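-- pv_equiv track=rewrite | github.com/Naenaenoi/ACS | test.py | sep_list_ops
-- ===== SOURCE A (Python) =====
-- operators = ['+', '-', '*', '/','^']
--
-- def sep_list_ops(expression):
--     sublists = []
--     current_sublist = []
--     for element in expression:
--         if element in operators:
--             sublists.append(current_sublist)
--             current_sublist = []
--             sublists.append([element])
--         else:
--             current_sublist.append(element)
--     sublists.append(current_sublist)
--     return sublists
-- ===== SOURCE B (Python) =====
-- operators = ['+', '-', '*', '/', '^']
--
-- def sep_list_ops(expression):
--     # Boundary-index decomposition: record where the last operator ended and
--     # emit segments as slices instead of growing an element accumulator.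
--     seq = list(expression)
--     res = []
--     prev = 0
--     for i, element in enumerate(seq):
--         if element in operators:
--             res.append(seq[prev:i])
--             res.append([element])
--             prev = i + 1
--     res.append(seq[prev:])
--     return res
-- ===== Notes on version B (the rewrite author's own statement) =====
-- stated objective: alternative
-- what changed: B replaces A's element-by-element current-sublist accumulator with boundary indices: it records where the previous segment ended and emits each segment as a slice seq[prev:i] at operator positions, plus a trailing slice.
import Mathlib
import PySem

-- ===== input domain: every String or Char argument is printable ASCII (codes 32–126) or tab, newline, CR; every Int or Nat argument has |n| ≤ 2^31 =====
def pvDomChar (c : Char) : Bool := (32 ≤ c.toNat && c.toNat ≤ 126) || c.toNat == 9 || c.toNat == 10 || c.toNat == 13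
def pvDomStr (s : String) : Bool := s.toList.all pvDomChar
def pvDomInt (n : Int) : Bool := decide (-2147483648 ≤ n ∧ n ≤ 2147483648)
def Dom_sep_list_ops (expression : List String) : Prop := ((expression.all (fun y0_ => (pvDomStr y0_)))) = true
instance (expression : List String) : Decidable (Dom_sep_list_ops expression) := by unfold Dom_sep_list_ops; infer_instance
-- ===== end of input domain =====

-- B emits segments as prev..i boundary slices at operator positions instead of growing an element accumulator (alternative decomposition, same cost).

-- ===== PORT A =====
def pvOperators : List String := ["+", "-", "*", "/", "^"]

-- A's loop body: state = (sublists, current_sublist)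
def pvStepA (st : List (List String) × List String) (element : String) :
    List (List String) × List String :=
  if pvOperators.contains element then
    (st.1 ++ [st.2] ++ [[element]], [])
  else
    (st.1, st.2 ++ [element])

def sep_list_ops (expression : List String) : List (List String) :=
  let st := expression.foldl pvStepA ([], [])
  st.1 ++ [st.2]

-- ===== PORT B =====
-- B's loop body over enumerate(seq): state = (res, prev); seq[prev:i] and [element] are appended at operators
def pvStepB (seq : List String) (st : List (List String) × Int) (p : Int × String) :
    List (List String) × Int :=
  if pvOperators.contains p.2 then
    (st.1 ++ [PySem.List.slice seq (some st.2) (some p.1)] ++ [[p.2]], p.1 + 1)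
  else
    st

def sep_list_ops_alt (expression : List String) : List (List String) :=
  let seq := expression
  let st := (PySem.List.enumerate seq 0).foldl (pvStepB seq) ([], 0)
  st.1 ++ [PySem.List.slice seq (some st.2) none]

-- ===== PRECONDITION & SPEC =====
def Spec_sep_list_ops (expression : List String) (out : List (List String)) : Prop := out = sep_list_ops_alt expression
instance (expression : List String) (out : List (List String)) : Decidable (Spec_sep_list_ops expression out) := by unfold Spec_sep_list_ops; infer_instance

-- ===== CLAIM (what is proved, stated in full; the proofs are below) =====
def Claim_equal_sep_list_ops : Prop := ∀ (expression : List String), Dom_sep_list_ops expression → Spec_sep_list_ops expression (sep_list_ops expression)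

-- ===== LEMMAS AND PROOFS =====

-- invariant: A's current_sublist is exactly the pending slice seq[prev:i]
theorem pv_fold_eq (seq : List String) :
    ∀ (xs : List String) (i prev : Nat) (subs : List (List String)),
      prev ≤ i → seq.drop i = xs →
      (let stA := xs.foldl pvStepA (subs, (seq.drop prev).take (i - prev))
       stA.1 ++ [stA.2]) =
      (let stB := (PySem.List.enumerate xs (i : Int)).foldl (pvStepB seq) (subs, (prev : Int))
       stB.1 ++ [PySem.List.slice seq (some stB.2) none]) := by
  intro xs
  induction xs with
  | nil =>
    intro i prev subs hpi hdrop
    have hlen : seq.length ≤ i := by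
      simpa [List.drop_eq_nil_iff] using hdrop
    have htake : (seq.drop prev).take (i - prev) = seq.drop prev := by
      apply List.take_of_length_le
      simp [List.length_drop]
      omega
    simp [PySem.List.enumerate, htake, PySem.List.slice_from_natCast]
  | cons x xs ih =>
    intro i prev subs hpi hdrop
    have hdrop' : seq.drop (i + 1) = xs := by
      have : seq.drop (i + 1) = (seq.drop i).drop 1 := by
        rw [List.drop_drop]
      rw [this, hdrop]
      rfl
    have hgi : seq[i]? = some x := by
      have h0 : (seq.drop i)[0]? = some x := by rw [hdrop]; rfl
      rw [List.getElem?_drop] at h0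
      simpa using h0
    rw [PySem.List.enumerate_cons]
    simp only [List.foldl_cons]
    by_cases hop : x ∈ pvOperators
    · have hslice : PySem.List.slice seq (some (prev : Int)) (some (i : Int)) =
          (seq.drop prev).take (i - prev) := PySem.List.slice_natCast seq prev i
      have h1 : pvStepA (subs, (seq.drop prev).take (i - prev)) x =
          (subs ++ [(seq.drop prev).take (i - prev)] ++ [[x]], []) := by
        simp [pvStepA, hop]
      have h2 : pvStepB seq (subs, (prev : Int)) ((i : Int), x) =
          (subs ++ [(seq.drop prev).take (i - prev)] ++ [[x]], (i : Int) + 1) := by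
        simp [pvStepB, hop, hslice]
      rw [h1, h2]
      have := ih (i + 1) (i + 1) (subs ++ [(seq.drop prev).take (i - prev)] ++ [[x]])
        (le_refl _) hdrop'
      simpa [Nat.sub_self, Nat.cast_add] using this
    · have h1 : pvStepA (subs, (seq.drop prev).take (i - prev)) x =
          (subs, (seq.drop prev).take (i - prev) ++ [x]) := by
        simp [pvStepA, hop]
      have h2 : pvStepB seq (subs, (prev : Int)) ((i : Int), x) = (subs, (prev : Int)) := by
        simp [pvStepB, hop]
      rw [h1, h2]
      have htake : (seq.drop prev).take (i + 1 - prev) =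
          (seq.drop prev).take (i - prev) ++ [x] := by
        have hidx : (seq.drop prev)[i - prev]? = some x := by
          rw [List.getElem?_drop]
          have : prev + (i - prev) = i := by omega
          rw [this, hgi]
        have : i + 1 - prev = (i - prev) + 1 := by omega
        rw [this, List.take_add_one, hidx]
        rfl
      have := ih (i + 1) prev subs (by omega) hdrop'
      rw [htake] at this
      simpa [Nat.cast_add] using this
-- ===== VERDICT (by name: the statement is the Claim_ definition above) =====
theorem sep_list_ops_spec : Claim_equal_sep_list_ops := by
  intro expression _
  unfold Spec_sep_list_ops sep_list_ops sep_list_ops_alt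
  have h := pv_fold_eq expression expression 0 0 []
  simpa using h (le_refl 0) (by simp)
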